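-- pv_equiv track=rewrite | github.com/noah-mclain/Jarvis-AI-Assistant | src/generative_ai_module/examples/improved_preprocessing.py | segment_by_dialogue_turns
-- ===== SOURCE A (Python) =====
-- def segment_by_dialogue_turns(text):
--     """Segment text into dialogue turns for better context modeling"""
--     segments = []
--     current_segment = []
--
--     for line in text.split('\n'):
--         if line.startswith('USER:') or line.startswith('ASSISTANT:'):
--             # Start a new segment if buffer is not empty
--             if current_segment:
--                 segments.append('\n'.join(current_segment))
--                 current_segment = []
--
--         if line.strip():
--             current_segment.append(line)
--
--     # Add the last segment
--     if current_segment: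
--         segments.append('\n'.join(current_segment))
--
--     return segments
-- ===== SOURCE B (Python) =====
-- def _is_marker(line):
--     return line.startswith('USER:') or line.startswith('ASSISTANT:')
--
--
-- def segment_by_dialogue_turns(text):
--     # Pass 1: keep only the non-blank lines.
--     lines = [l for l in text.split('\n') if l.strip()]
--     # Pass 2: cut the filtered list into blocks; a block runs from one line
--     # up to (not including) the next marker line.
--     segments = []
--     while lines:
--         j = 1
--         while j < len(lines) and not _is_marker(lines[j]):
--             j += 1
--         segments.append('\n'.join(lines[:j]))
--         lines = lines[j:]
--     return segments
-- ===== Notes on version B (the rewrite author's own statement) =====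
-- stated objective: simpler
-- what changed: Replaces the single stateful loop (flush-buffer-on-marker with an end-of-loop flush) by two passes: filter out blank lines first, then cut the filtered list into blocks at marker lines.
import Mathlib
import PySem

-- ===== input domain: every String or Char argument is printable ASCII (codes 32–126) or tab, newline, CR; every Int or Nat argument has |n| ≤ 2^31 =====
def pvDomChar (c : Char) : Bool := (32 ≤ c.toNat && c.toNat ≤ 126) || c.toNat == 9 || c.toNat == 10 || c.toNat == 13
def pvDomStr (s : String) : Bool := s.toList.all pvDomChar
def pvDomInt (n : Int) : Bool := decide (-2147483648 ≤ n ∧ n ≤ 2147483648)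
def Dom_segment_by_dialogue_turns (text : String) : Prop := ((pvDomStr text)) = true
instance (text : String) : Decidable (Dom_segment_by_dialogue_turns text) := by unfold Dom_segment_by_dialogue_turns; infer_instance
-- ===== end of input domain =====

-- B replaces A's single stateful flush-buffer loop by two passes (filter out blank lines, then cut into blocks at marker lines); objective: simpler.


-- ===== PORT A =====
-- A's loop body, state = (segments, current_segment)
def pvStepA (st : List String × List String) (line : String) : List String × List String :=
  let st1 :=
    if PySem.Str.startswith line "USER:" || PySem.Str.startswith line "ASSISTANT:" then
      if st.2 ≠ [] then (st.1 ++ [PySem.Str.join "\n" st.2], ([] : List String)) else st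
    else st
  if PySem.Str.strip line ≠ "" then (st1.1, st1.2 ++ [line]) else st1

def segment_by_dialogue_turns (text : String) : List String :=
  let fin := ((PySem.Str.split? text "\n").getD []).foldl pvStepA ([], [])
  if fin.2 ≠ [] then fin.1 ++ [PySem.Str.join "\n" fin.2] else fin.1

-- ===== PORT B =====
def pvIsMarker (line : String) : Bool :=
  PySem.Str.startswith line "USER:" || PySem.Str.startswith line "ASSISTANT:"

-- the grouping loop of Source B: each block is its first line plus the following non-marker lines
def pvBlocks : List String → List String
  | [] => []
  | l :: rest =>
    PySem.Str.join "\n" (l :: rest.takeWhile (fun x => !pvIsMarker x)) ::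
      pvBlocks (rest.dropWhile (fun x => !pvIsMarker x))
termination_by ls => ls.length
decreasing_by
  exact Nat.lt_succ_of_le (List.length_dropWhile_le _ _)

def segment_by_dialogue_turns_alt (text : String) : List String :=
  pvBlocks (((PySem.Str.split? text "\n").getD []).filter (fun l => PySem.Str.strip l != ""))

-- ===== PRECONDITION & SPEC =====
def Spec_segment_by_dialogue_turns (text : String) (out : List String) : Prop := out = segment_by_dialogue_turns_alt text
instance (text : String) (out : List String) : Decidable (Spec_segment_by_dialogue_turns text out) := by unfold Spec_segment_by_dialogue_turns; infer_instance

-- ===== CLAIM (what is proved, stated in full; the proofs are below) =====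
def Claim_equal_segment_by_dialogue_turns : Prop := ∀ (text : String), Dom_segment_by_dialogue_turns text → Spec_segment_by_dialogue_turns text (segment_by_dialogue_turns text)

-- ===== LEMMAS AND PROOFS =====

theorem pv_mem_dropWhile (p : Char → Bool) (c : Char) (cs : List Char) (hc : c ∈ cs)
    (hp : p c = false) : c ∈ cs.dropWhile p := by
  induction cs with
  | nil => cases hc
  | cons a as ih =>
    by_cases hpa : p a = true
    · rw [List.dropWhile_cons_of_pos hpa]
      rcases List.mem_cons.mp hc with rfl | h
      · rw [hp] at hpa; cases hpa
      · exact ih h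
    · rw [List.dropWhile_cons_of_neg hpa]
      exact hc

-- a list of chars containing a 'U' or an 'A' does not strip to empty
theorem pvStrip_ne_nil (cs : List Char) (c : Char) (hc : c ∈ cs) (hca : c = 'U' ∨ c = 'A') :
    PySem.Chars.strip cs ≠ [] := by
  simp [PySem.Chars.strip, PySem.Chars.lstrip, PySem.Chars.rstrip, PySem.Chars.isspace]
  refine ⟨c, pv_mem_dropWhile _ c cs hc ?_, ?_⟩ <;> rcases hca with h | h <;> subst h <;> decide

-- a line that is all whitespace cannot start with "USER:" / "ASSISTANT:"
theorem pvMarker_of_blank (l : String) (h : PySem.Str.strip l = "") :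
    PySem.Str.startswith l "USER:" = false ∧ PySem.Str.startswith l "ASSISTANT:" = false := by
  have hnil : PySem.Chars.strip l.toList = [] := by
    have := congrArg String.toList h
    simpa [PySem.Str.toList_strip] using this
  constructor
  · by_contra hs
    rw [Bool.not_eq_false, PySem.Str.startswith_eq] at hs
    obtain ⟨t, ht⟩ := (PySem.Chars.startswith_iff _ _).mp hs
    refine absurd hnil (pvStrip_ne_nil l.toList 'U' ?_ (Or.inl rfl))
    rw [← ht]; exact List.mem_append_left _ (by decide)
  · by_contra hs
    rw [Bool.not_eq_false, PySem.Str.startswith_eq] at hs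
    obtain ⟨t, ht⟩ := (PySem.Chars.startswith_iff _ _).mp hs
    refine absurd hnil (pvStrip_ne_nil l.toList 'A' ?_ (Or.inr rfl))
    rw [← ht]; exact List.mem_append_left _ (by decide)

-- a blank line is a no-op for A's loop
theorem pvStepA_blank (st : List String × List String) (l : String)
    (h : PySem.Str.strip l = "") : pvStepA st l = st := by
  obtain ⟨h1, h2⟩ := pvMarker_of_blank l h
  have h1' : PySem.Chars.startswith l.toList ['U', 'S', 'E', 'R', ':'] = false := by simpa using h1
  have h2' : PySem.Chars.startswith l.toList ['A', 'S', 'S', 'I', 'S', 'T', 'A', 'N', 'T', ':'] = false := by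
    simpa using h2
  simp [pvStepA, h1', h2', h]

-- A's fold only sees the non-blank lines
theorem pvFoldA_filter (ls : List String) (st : List String × List String) :
    ls.foldl pvStepA st = (ls.filter (fun l => PySem.Str.strip l != "")).foldl pvStepA st := by
  induction ls generalizing st with
  | nil => rfl
  | cons l ls ih =>
    by_cases hb : PySem.Str.strip l = ""
    · simp [List.foldl, List.filter, hb, pvStepA_blank st l hb, ih]
    · have hbne : (PySem.Str.strip l != "") = true := bne_iff_ne.mpr hb
      simp [List.foldl, List.filter, hbne, ih]

-- A's final flush
def pvFinish (st : List String × List String) : List String :=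
  if st.2 ≠ [] then st.1 ++ [PySem.Str.join "\n" st.2] else st.1

-- main invariant: with a non-empty buffer, A's fold over non-blank lines emits the
-- buffer extended up to the next marker, then B's blocks of the remainder
theorem pvFoldA_blocks (ls : List String) (segs cur : List String)
    (hls : ∀ l ∈ ls, PySem.Str.strip l ≠ "") (hcur : cur ≠ []) :
    pvFinish (ls.foldl pvStepA (segs, cur)) =
      segs ++ (PySem.Str.join "\n" (cur ++ ls.takeWhile (fun x => !pvIsMarker x)) ::
        pvBlocks (ls.dropWhile (fun x => !pvIsMarker x))) := by
  induction ls generalizing segs cur with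
  | nil => simp [pvFinish, hcur, pvBlocks]
  | cons l ls ih =>
    have hl : PySem.Str.strip l ≠ "" := hls l (List.mem_cons_self ..)
    have hls' : ∀ x ∈ ls, PySem.Str.strip x ≠ "" := fun x hx => hls x (List.mem_cons_of_mem _ hx)
    by_cases hm : pvIsMarker l = true
    · have hm' : PySem.Chars.startswith l.toList ['U', 'S', 'E', 'R', ':'] = true ∨
          PySem.Chars.startswith l.toList ['A', 'S', 'S', 'I', 'S', 'T', 'A', 'N', 'T', ':'] = true := by
        simpa [pvIsMarker] using hm
      have hstep : pvStepA (segs, cur) l = (segs ++ [PySem.Str.join "\n" cur], [l]) := by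
        simp [pvStepA, hm', hcur, hl]
      rw [List.foldl_cons, hstep, ih _ _ hls' (by simp)]
      simp [List.takeWhile, List.dropWhile, hm, pvBlocks]
    · have hm' : PySem.Chars.startswith l.toList ['U', 'S', 'E', 'R', ':'] = false ∧
          PySem.Chars.startswith l.toList ['A', 'S', 'S', 'I', 'S', 'T', 'A', 'N', 'T', ':'] = false := by
        simpa [pvIsMarker] using hm
      have hstep : pvStepA (segs, cur) l = (segs, cur ++ [l]) := by
        simp [pvStepA, hm'.1, hm'.2, hl]
      rw [List.foldl_cons, hstep, ih _ _ hls' (by simp)]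
      simp [List.takeWhile, List.dropWhile, hm]

-- starting from the empty state, A's fold + final flush produces exactly B's blocks
theorem pvFinish_blocks (ls : List String) (hls : ∀ l ∈ ls, PySem.Str.strip l ≠ "") :
    pvFinish (ls.foldl pvStepA ([], [])) = pvBlocks ls := by
  cases ls with
  | nil => simp [pvFinish, pvBlocks]
  | cons l ls =>
    have hl : PySem.Str.strip l ≠ "" := hls l (List.mem_cons_self ..)
    have hstep : pvStepA ([], []) l = ([], [l]) := by
      simp [pvStepA, hl]
    rw [List.foldl_cons, hstep,
      pvFoldA_blocks ls [] [l] (fun x hx => hls x (List.mem_cons_of_mem _ hx)) (by simp)]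
    simp [pvBlocks]

-- ===== VERDICT (by name: the statement is the Claim_ definition above) =====
theorem segment_by_dialogue_turns_spec : Claim_equal_segment_by_dialogue_turns := by
  intro text _
  show pvFinish (((PySem.Str.split? text "\n").getD []).foldl pvStepA ([], [])) = _
  rw [pvFoldA_filter]
  exact pvFinish_blocks _ (fun l hl => by
    have := (List.mem_filter.mp hl).2
    simpa using this)
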